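-- pv_equiv track=rewrite | github.com/tiantao-1/DIAT | Programs_deployed_on_embedded_devices.py | EventLocate
-- ===== SOURCE A (Python) =====
-- def EventLocate(csv_count, incident_value_index):
--     '''
--     进行事件的定位
--
--     :param csv_count: 当前单个功率数据在csv文件中的标签
--     :param incident_value_index: 巡检窗口所有事件的积分绝对值对应的标签
--     :return: 返回当前事件起始点的标签值，可能有多个
--     '''
--
--     temporary_event_start_index = []    #   用于拆分多个事件的标签
--     index_list = [] #   事件起始对应在incident_value_index里的标签
--     current_event_start_index = []  #   事件的起始标签
--     for i in range(len(incident_value_index)-1):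
--         if incident_value_index[i]+1 != incident_value_index[i+1]:
--             index_list.append(i+1)
--     if len(index_list) > 0:
--         temporary_event_start_index.append(incident_value_index[0]+2)
--         for i in index_list:
--             temporary_event_start_index.append(incident_value_index[i]+2)
--     else:
--         temporary_event_start_index.append(incident_value_index[0]+2)
--     for i in temporary_event_start_index:
--         current_event_start_index.append(csv_count-20+i)
--
--     return current_event_start_index
-- ===== SOURCE B (Python) =====
-- def EventLocate(csv_count, incident_value_index):
--     '''Run segmentation: jump from run start to run start (inner while skips
--     the maximal consecutive run), emitting the label of each run head.
--     Returns [] on empty input (where A raises IndexError).'''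
--     n = len(incident_value_index)
--     result = []
--     i = 0
--     while i < n:
--         result.append(csv_count - 18 + incident_value_index[i])
--         j = i + 1
--         while j < n and incident_value_index[j] == incident_value_index[j - 1] + 1:
--             j += 1
--         i = j
--     return result
-- ===== Notes on version B (the rewrite author's own statement) =====
-- stated objective: alternative
-- what changed: A collects gap positions into index_list, rebuilds start values from it, then maps the offset in three sequential loops; B instead segments the list into maximal consecutive runs with a run-skipping nested while (outer loop visits only run heads, inner loop jumps the index past the run), emitting each head's label directly.
import Mathlib
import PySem

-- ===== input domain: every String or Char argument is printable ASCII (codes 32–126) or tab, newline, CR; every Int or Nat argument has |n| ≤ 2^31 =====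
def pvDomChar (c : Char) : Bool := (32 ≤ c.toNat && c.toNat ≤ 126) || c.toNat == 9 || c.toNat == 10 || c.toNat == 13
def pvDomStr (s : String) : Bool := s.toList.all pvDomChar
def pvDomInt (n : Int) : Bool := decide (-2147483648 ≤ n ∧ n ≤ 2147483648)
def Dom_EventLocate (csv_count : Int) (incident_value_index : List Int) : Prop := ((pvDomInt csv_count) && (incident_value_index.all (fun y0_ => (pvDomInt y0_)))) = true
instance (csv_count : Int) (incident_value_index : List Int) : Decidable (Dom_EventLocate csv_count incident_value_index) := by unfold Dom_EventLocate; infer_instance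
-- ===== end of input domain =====

-- B replaces A's three sequential loops (collect gap positions, rebuild start
-- values, map the offset) by run segmentation: a run-skipping nested while that
-- visits only run heads (objective: alternative).

-- ===== PORT A =====
-- index_list: for i in range(len(xs)-1): if xs[i]+1 != xs[i+1]: append(i+1)
def evIndexList (incident_value_index : List Int) : List Int :=
  (PySem.List.pyRange 0 ((incident_value_index.length : Int) - 1) 1).foldl
    (fun acc i =>
      if (PySem.List.pyGetD incident_value_index i 0 + 1
            != PySem.List.pyGetD incident_value_index (i + 1) 0) then acc ++ [i + 1]
      else acc) []

-- temporary_event_start_index (xs[0] raises IndexError on []; excluded by Pre_)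
def evTemporary (incident_value_index : List Int) : List Int :=
  if (evIndexList incident_value_index).length > 0 then
    (evIndexList incident_value_index).foldl
      (fun acc i => acc ++ [PySem.List.pyGetD incident_value_index i 0 + 2])
      ([] ++ [PySem.List.pyGetD incident_value_index 0 0 + 2])
  else [] ++ [PySem.List.pyGetD incident_value_index 0 0 + 2]

def EventLocate (csv_count : Int) (incident_value_index : List Int) : List Int :=
  -- current_event_start_index: for i in temporary: append(csv_count - 20 + i)
  (evTemporary incident_value_index).foldl (fun acc i => acc ++ [csv_count - 20 + i]) []

-- ===== PORT B =====
-- inner while: j = i+1; while j < n and xs[j] == xs[j-1] + 1: j += 1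
def evRunEnd (xs : List Int) (j : Nat) : Nat :=
  if _h : j < xs.length then
    if xs.getD j 0 == xs.getD (j - 1) 0 + 1 then evRunEnd xs (j + 1) else j
  else j
termination_by xs.length - j

-- the port's termination needs: evRunEnd never moves the index backwards
theorem evRunEnd_ge (xs : List Int) (j : Nat) : j ≤ evRunEnd xs j := by
  unfold evRunEnd
  split_ifs with h1 h2
  · exact le_trans (Nat.le_succ j) (evRunEnd_ge xs (j + 1))
  · exact le_refl j
  · exact le_refl j
termination_by xs.length - j

-- outer while: while i < n: append(csv_count - 18 + xs[i]); i = runEnd(i+1)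
def evOuter (csv_count : Int) (xs : List Int) (i : Nat) (acc : List Int) : List Int :=
  if _h : i < xs.length then
    evOuter csv_count xs (evRunEnd xs (i + 1)) (acc ++ [csv_count - 18 + xs.getD i 0])
  else acc
termination_by xs.length - i
decreasing_by
  have := evRunEnd_ge xs (i + 1)
  omega

def EventLocate_alt (csv_count : Int) (incident_value_index : List Int) : List Int :=
  evOuter csv_count incident_value_index 0 []

-- ===== PRECONDITION & SPEC =====
-- Pre_ excludes only the empty list, on which the Python A raises IndexError (xs[0]).
def Pre_EventLocate (csv_count : Int) (incident_value_index : List Int) : Prop :=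
  incident_value_index ≠ []
instance (csv_count : Int) (incident_value_index : List Int) : Decidable (Pre_EventLocate csv_count incident_value_index) := by unfold Pre_EventLocate; infer_instance

def pvWitness_EventLocate : Int × List Int := (100, [1, 2, 5, 6, 9])

def Spec_EventLocate (csv_count : Int) (incident_value_index : List Int) (out : List Int) : Prop := out = EventLocate_alt csv_count incident_value_index
instance (csv_count : Int) (incident_value_index : List Int) (out : List Int) : Decidable (Spec_EventLocate csv_count incident_value_index out) := by unfold Spec_EventLocate; infer_instance

-- ===== CLAIM (what is proved, stated in full; the proofs are below) =====
def Claim_equal_EventLocate : Prop := ∀ (csv_count : Int) (incident_value_index : List Int), Dom_EventLocate csv_count incident_value_index → Pre_EventLocate csv_count incident_value_index → Spec_EventLocate csv_count incident_value_index (EventLocate csv_count incident_value_index)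

-- ===== LEMMAS AND PROOFS =====

-- reference: the run-break events of `l` after previous value `prev`, offset by `base`
def evRef (base : Int) : Int → List Int → List Int
  | _, [] => []
  | prev, v :: t => (if v != prev + 1 then [base + v] else []) ++ evRef base v t

theorem bne_swap (a b : Int) : (a != b) = (b != a) := by
  simp [bne, eq_comm]

-- the index-filtered form of the break positions equals the reference
theorem ref_filter (base : Int) (rest : List Int) : ∀ (x : Int),
    ((List.range rest.length).filter
        (fun i => (x :: rest).getD i 0 + 1 != rest.getD i 0)).map
      (fun i => base + rest.getD i 0) = evRef base x rest := by
  induction rest with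
  | nil => intro x; simp [evRef]
  | cons v t ih =>
    intro x
    rw [List.length_cons, List.range_succ_eq_map]
    cases hb : ((x : Int) + 1 != v) <;>
      simp [List.filter_map, Function.comp_def, List.map_map, hb, evRef,
        bne_swap v (x + 1), ← ih v]

-- A equals the reference on a non-empty list
theorem A_eq_ref (csv_count x : Int) (rest : List Int) :
    EventLocate csv_count (x :: rest)
      = (csv_count - 18 + x) :: evRef (csv_count - 18) x rest := by
  unfold EventLocate evTemporary evIndexList
  have hlen : ((x :: rest).length : Int) - 1 = (rest.length : Nat) := by
    push_cast [List.length_cons]; omega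
  rw [hlen, PySem.List.pyRange_zero_natCast, List.foldl_map,
    PySem.List.foldl_append_if]
  have hcast : ∀ i : Nat,
      (PySem.List.pyGetD (x :: rest) (i : Int) 0 + 1
          != PySem.List.pyGetD (x :: rest) ((i : Int) + 1) 0)
        = ((x :: rest).getD i 0 + 1 != rest.getD i 0) := by
    intro i
    have : ((i : Int) + 1) = ((i + 1 : Nat) : Int) := by push_cast; ring
    rw [this, PySem.List.pyGetD_natCast, PySem.List.pyGetD_natCast,
      List.getD_cons_succ]
  simp only [hcast]
  set P : Nat → Bool := fun i => ((x :: rest).getD i 0 + 1 != rest.getD i 0) with hP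
  set flt := (List.range rest.length).filter P with hflt
  have hget0 : PySem.List.pyGetD (x :: rest) 0 0 = x := by
    simp [PySem.List.pyGetD]
  split_ifs with h0
  · rw [PySem.List.foldl_append_singleton_eq_map,
      PySem.List.foldl_append_singleton_eq_map,
      hget0, ← ref_filter (csv_count - 18) rest x, ← hP, ← hflt]
    simp only [List.nil_append, List.map_append, List.map_cons, List.map_nil,
      List.map_map]
    rw [List.singleton_append]
    congr 1
    · ring_nf
    · apply List.map_congr_left
      intro i _
      simp only [Function.comp_apply]
      rw [show ((i : Int) + 1) = ((i + 1 : Nat) : Int) by push_cast; ring,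
        PySem.List.pyGetD_natCast, List.getD_cons_succ]
      omega
  · have hfe : flt = [] := by
      cases hc : flt with
      | nil => rfl
      | cons a l => rw [hc] at h0; exact absurd (by simp) h0
    have href : evRef (csv_count - 18) x rest = [] := by
      rw [← ref_filter (csv_count - 18) rest x, ← hflt, hfe]; rfl
    rw [hfe] at *
    simp [hget0, href]
    omega

-- evRunEnd finds the first break: the reference tail after index j-1 restarts there
theorem runEnd_ref (base : Int) (xs : List Int) (j : Nat)
    (h1 : 1 ≤ j) (h2 : j ≤ xs.length) :
    evRef base (xs.getD (j - 1) 0) (xs.drop j)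
      = (if h : evRunEnd xs j < xs.length then
          (base + xs.getD (evRunEnd xs j) 0)
            :: evRef base (xs.getD (evRunEnd xs j) 0) (xs.drop (evRunEnd xs j + 1))
        else []) := by
  unfold evRunEnd
  by_cases hj : j < xs.length
  · have hdrop : xs.drop j = xs.getD j 0 :: xs.drop (j + 1) := by
      rw [List.getD_eq_getElem _ _ hj, List.drop_eq_getElem_cons hj]
    by_cases hc : xs.getD j 0 == xs.getD (j - 1) 0 + 1
    · have hceq : xs.getD j 0 = xs.getD (j - 1) 0 + 1 := eq_of_beq hc
      have ih := runEnd_ref base xs (j + 1) (by omega) (by omega)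
      rw [Nat.add_sub_cancel] at ih
      rw [hceq] at ih
      rw [hdrop]
      simp only [dif_pos hj, evRef, hceq]
      simpa using ih
    · rw [hdrop]
      simp only [dif_pos hj, if_neg hc, evRef]
      have hne : (xs.getD j 0 != xs.getD (j - 1) 0 + 1) = true := by
        simpa [bne] using hc
      rw [hne]
      simp [hj]
  · have hje : j = xs.length := by omega
    simp [hje, evRef, List.drop_length]
termination_by xs.length - j

-- the outer loop, started at a run head, appends the head then the reference breaks
theorem outer_ref (csv_count : Int) (xs : List Int) (i : Nat) (acc : List Int)
    (hi : i < xs.length) :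
    evOuter csv_count xs i acc
      = acc ++ (csv_count - 18 + xs.getD i 0)
          :: evRef (csv_count - 18) (xs.getD i 0) (xs.drop (i + 1)) := by
  rw [evOuter, dif_pos hi]
  have href := runEnd_ref (csv_count - 18) xs (i + 1) (by omega) (by omega)
  have : (i + 1) - 1 = i := by omega
  rw [this] at href
  by_cases hk : evRunEnd xs (i + 1) < xs.length
  · rw [dif_pos hk] at href
    have ih := outer_ref csv_count xs (evRunEnd xs (i + 1))
      (acc ++ [csv_count - 18 + xs.getD i 0]) hk
    rw [ih, href]
    simp
  · rw [dif_neg hk] at href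
    rw [evOuter, dif_neg hk, href]
termination_by xs.length - i
decreasing_by
  have := evRunEnd_ge xs (i + 1)
  omega

-- B equals the reference on a non-empty list
theorem B_eq_ref (csv_count x : Int) (rest : List Int) :
    EventLocate_alt csv_count (x :: rest)
      = (csv_count - 18 + x) :: evRef (csv_count - 18) x rest := by
  unfold EventLocate_alt
  rw [outer_ref csv_count (x :: rest) 0 [] (by simp)]
  simp

-- ===== VERDICT (by name: the statement is the Claim_ definition above) =====
theorem EventLocate_spec : Claim_equal_EventLocate := by
  intro csv_count xs _ hpre
  cases xs with
  | nil => exact absurd rfl hpre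
  | cons x rest =>
    show EventLocate csv_count (x :: rest) = EventLocate_alt csv_count (x :: rest)
    rw [A_eq_ref, B_eq_ref]
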